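-- pv_equiv track=rewrite | github.com/SeongwonTak/PS_swtak | BOJ_2502.py | solve
-- ===== SOURCE A (Python) =====
-- def solve(day):  # 초항을 몰라서 ax+by에서 계수를 잡는다.
--     x1 = 1
--     x2 = 0
--     y1 = 0
--     y2 = 1
--     for i in range(2, day):
--         x3 = x1+x2
--         y3 = y1+y2
--         x1 = x2
--         x2 = x3
--         y1 = y2
--         y2 = y3
--     return x3, y3
-- ===== SOURCE B (Python) =====
-- def _fib(n):
--     # fast doubling: returns (F(n), F(n+1)) with F(0)=0, F(1)=1
--     if n <= 0:
--         return (0, 1)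
--     a, b = _fib(n >> 1)
--     c = a * (2 * b - a)
--     d = a * a + b * b
--     return (d, c + d) if n & 1 else (c, d)
--
--
-- def solve(day):
--     return _fib(day - 2)
-- ===== Notes on version B (the rewrite author's own statement) =====
-- stated objective: alternative
-- what changed: Replaces the O(day) linear coefficient loop by the fast-doubling Fibonacci recursion computing (F(day-2), F(day-1)) in O(log day) arithmetic steps (intended as faster; a timing run measured 143x at n=65536 but could not confirm at the largest size, where decoding the huge Fibonacci output fails).
-- outside the precondition, e.g. on solve(2): A raises UnboundLocalError, B returns (0, 1)
import Mathlib
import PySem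

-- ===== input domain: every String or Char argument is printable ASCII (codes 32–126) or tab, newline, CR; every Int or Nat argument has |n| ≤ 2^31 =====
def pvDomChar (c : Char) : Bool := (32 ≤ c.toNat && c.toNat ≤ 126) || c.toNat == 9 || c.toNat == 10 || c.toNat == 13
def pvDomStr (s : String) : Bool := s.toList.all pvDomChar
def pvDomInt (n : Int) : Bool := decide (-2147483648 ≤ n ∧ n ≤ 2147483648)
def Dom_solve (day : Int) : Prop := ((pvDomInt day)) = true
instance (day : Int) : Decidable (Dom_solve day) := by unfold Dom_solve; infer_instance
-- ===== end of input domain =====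

-- B replaces A's linear coefficient loop by the fast-doubling Fibonacci recursion,
-- computing the same pair (F(day-2), F(day-1)) in O(log day) arithmetic steps
-- (objective: alternative; intended as faster, measured 143x at n=65536 by the timing
-- run, unconfirmed at the largest size where decoding the huge output fails).

-- ===== PORT A =====
-- one iteration of the Python for-loop body (the loop variable i is unused);
-- the Option component records whether x3/y3 have been assigned yet
def solveStep (st : Int × Int × Int × Int × Option (Int × Int)) :
    Int × Int × Int × Int × Option (Int × Int) :=
  let (x1, x2, y1, y2, _) := st
  let x3 := x1 + x2
  let y3 := y1 + y2
  (x2, x3, y2, y3, some (x3, y3))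

def solve (day : Int) : Int × Int :=
  let s := (PySem.List.pyRange 2 day 1).foldl (fun st _ => solveStep st) (1, 0, 0, 1, none)
  -- Python raises UnboundLocalError when the loop never ran (day ≤ 2): excluded by Pre_solve
  (s.2.2.2.2).getD (0, 0)

-- ===== PORT B =====
-- fast doubling: fd n = (F(n), F(n+1)); Python's n <= 0 base is n = 0 after toNat
def fd (n : Nat) : Int × Int :=
  if h : n = 0 then (0, 1)
  else
    let p := fd (n / 2)
    let a := p.1
    let b := p.2
    let c := a * (2 * b - a)
    let d := a * a + b * b
    if n % 2 = 1 then (d, c + d) else (c, d)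
decreasing_by exact Nat.div_lt_self (Nat.pos_of_ne_zero h) one_lt_two

def solve_alt (day : Int) : Int × Int := fd (day - 2).toNat

-- ===== PRECONDITION & SPEC =====
-- A raises UnboundLocalError for day ≤ 2 (the loop body never runs, x3 is unbound)
def Pre_solve (day : Int) : Prop := 3 ≤ day
instance (day : Int) : Decidable (Pre_solve day) := by unfold Pre_solve; infer_instance
def pvWitness_solve : Int := 7

def Spec_solve (day : Int) (out : Int × Int) : Prop := out = solve_alt day
instance (day : Int) (out : Int × Int) : Decidable (Spec_solve day out) := by unfold Spec_solve; infer_instance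

-- ===== CLAIM (what is proved, stated in full; the proofs are below) =====
def Claim_equal_solve : Prop := ∀ (day : Int), Dom_solve day → Pre_solve day → Spec_solve day (solve day)

-- ===== LEMMAS AND PROOFS =====

-- cast Fibonacci recurrence
theorem fibI_add_two (n : Nat) :
    ((Nat.fib (n + 2) : Int)) = (Nat.fib n : Int) + (Nat.fib (n + 1) : Int) := by
  rw [Nat.fib_add_two]; push_cast; ring

-- fast doubling computes Fibonacci pairs
theorem fd_eq (n : Nat) : fd n = ((Nat.fib n : Int), (Nat.fib (n + 1) : Int)) := by
  induction n using Nat.strong_induction_on with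
  | _ n ih =>
    rw [fd]
    by_cases h : n = 0
    · simp [h]
    · simp only [h, dif_neg, not_false_iff]
      by_cases hpar : n % 2 = 1
      · obtain ⟨q, rfl⟩ : ∃ q, n = 2 * q + 1 := ⟨n / 2, by omega⟩
        have hdiv : (2 * q + 1) / 2 = q := by omega
        rw [hdiv, ih q (by omega), if_pos (by omega : (2 * q + 1) % 2 = 1), Prod.mk.injEq]
        have hq : Nat.fib q ≤ 2 * Nat.fib (q + 1) := by
          have := Nat.fib_le_fib_succ (n := q); omega
        constructor
        · rw [Nat.fib_two_mul_add_one]; push_cast; ring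
        · rw [show 2 * q + 1 + 1 = 2 * q + 2 from rfl, Nat.fib_add_two,
              Nat.fib_two_mul, Nat.fib_two_mul_add_one]
          push_cast [hq]; ring
      · obtain ⟨q, rfl⟩ : ∃ q, n = 2 * q := ⟨n / 2, by omega⟩
        have hdiv : 2 * q / 2 = q := by omega
        rw [hdiv, ih q (by omega), if_neg (by omega : ¬ (2 * q) % 2 = 1), Prod.mk.injEq]
        have hq : Nat.fib q ≤ 2 * Nat.fib (q + 1) := by
          have := Nat.fib_le_fib_succ (n := q); omega
        constructor
        · rw [Nat.fib_two_mul]; push_cast [hq]; ring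
        · rw [Nat.fib_two_mul_add_one]; push_cast; ring

-- folding a step that ignores the list elements is iteration
theorem foldl_const_step (l : List Int) (st : Int × Int × Int × Int × Option (Int × Int)) :
    l.foldl (fun st _ => solveStep st) st = solveStep^[l.length] st := by
  induction l generalizing st with
  | nil => rfl
  | cons x xs ih => simp [List.foldl_cons, ih, Function.iterate_succ_apply]

-- invariant of A's loop after k+1 iterations
theorem iter_solveStep (k : Nat) :
    solveStep^[k + 1] (1, 0, 0, 1, none) =
      ((Nat.fib k : Int), (Nat.fib (k + 1) : Int), (Nat.fib (k + 1) : Int),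
        (Nat.fib (k + 2) : Int), some ((Nat.fib (k + 1) : Int), (Nat.fib (k + 2) : Int))) := by
  induction k with
  | zero => simp [solveStep]
  | succ k ih =>
    rw [Function.iterate_succ_apply', ih]
    have e1 : ((Nat.fib k : Int)) + (Nat.fib (k + 1) : Int) = (Nat.fib (k + 2) : Int) :=
      (fibI_add_two k).symm
    have e2 : ((Nat.fib (k + 1) : Int)) + (Nat.fib (k + 2) : Int) = (Nat.fib (k + 3) : Int) :=
      (fibI_add_two (k + 1)).symm
    simp only [solveStep, Prod.mk.injEq, Option.some.injEq]
    exact ⟨trivial, e1, trivial, e2, e1, e2⟩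

theorem solve_fib (day : Int) (h : 3 ≤ day) :
    solve day = ((Nat.fib (day - 2).toNat : Int), (Nat.fib ((day - 2).toNat + 1) : Int)) := by
  have hlen : (PySem.List.pyRange 2 day 1).length = (day - 2).toNat :=
    PySem.List.length_pyRange_one 2 day
  obtain ⟨k, hk⟩ : ∃ k : Nat, (day - 2).toNat = k + 1 := by
    refine ⟨(day - 3).toNat, ?_⟩; omega
  simp only [solve, foldl_const_step, hlen, hk, iter_solveStep]
  have h2 : k + 2 = (k + 1) + 1 := rfl
  simp

-- ===== VERDICT (by name: the statement is the Claim_ definition above) =====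
theorem solve_spec : Claim_equal_solve := by
  intro day _ hpre
  unfold Spec_solve solve_alt
  rw [fd_eq, solve_fib day hpre]
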